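-- pv_equiv track=rewrite | github.com/seacow-technology/agentos | octopusos/core/brain/navigation/zone_detector.py | infer_sources
-- ===== SOURCE A (Python) =====
-- from typing import List
--
-- def infer_sources(evidence_types: List[str]) -> List[str]:
--     """
--     从 evidence.type 推断覆盖来源
--
--     映射：
--     - git_commit, git_* -> "git"
--     - doc_mention, doc_* -> "doc"
--     - code_reference, code_* -> "code"
--     """
--     sources = set()
--
--     for ev_type in evidence_types:
--         if ev_type.startswith('git'):
--             sources.add('git')
--         elif ev_type.startswith('doc'):
--             sources.add('doc')
--         elif ev_type.startswith('code'):
--             sources.add('code')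
--
--     return sorted(list(sources))
-- ===== SOURCE B (Python) =====
-- from typing import List
--
-- def infer_sources(evidence_types: List[str]) -> List[str]:
--     # Categories listed in alphabetical order, so no set and no final sort is needed.
--     return [cat for cat in ("code", "doc", "git")
--             if any(ev.startswith(cat) for ev in evidence_types)]
-- ===== Notes on version B (the rewrite author's own statement) =====
-- stated objective: idiomatic
-- what changed: Instead of classifying each evidence string into a set and sorting it at the end, B scans the fixed alphabetical category list (code, doc, git) and keeps each category for which some evidence string has it as a prefix, so no set and no sort are needed.
import Mathlib
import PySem

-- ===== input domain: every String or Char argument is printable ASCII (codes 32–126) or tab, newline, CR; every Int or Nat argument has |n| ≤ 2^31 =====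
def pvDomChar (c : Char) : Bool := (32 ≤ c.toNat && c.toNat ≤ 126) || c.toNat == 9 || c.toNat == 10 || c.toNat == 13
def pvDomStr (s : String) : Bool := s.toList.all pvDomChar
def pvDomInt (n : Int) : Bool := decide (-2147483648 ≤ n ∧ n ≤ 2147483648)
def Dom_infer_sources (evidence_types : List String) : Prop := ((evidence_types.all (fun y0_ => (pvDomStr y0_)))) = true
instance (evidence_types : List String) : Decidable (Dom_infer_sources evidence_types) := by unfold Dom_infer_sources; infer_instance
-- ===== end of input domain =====

-- B replaces A's classify-into-a-set-then-sort pass by a scan over the fixed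
-- alphabetical category list, keeping each category some evidence string starts with (idiomatic; return value only).

-- ===== PORT A =====
def infer_sources (evidence_types : List String) : List String :=
  let sources : PySem.Set String := evidence_types.foldl (fun s ev =>
    if PySem.Str.startswith ev "git" then PySem.Set.add s "git"
    else if PySem.Str.startswith ev "doc" then PySem.Set.add s "doc"
    else if PySem.Str.startswith ev "code" then PySem.Set.add s "code"
    else s) PySem.Set.empty
  PySem.List.sorted sources (fun x => x) false

-- ===== PORT B =====
def infer_sources_alt (evidence_types : List String) : List String :=
  ["code", "doc", "git"].filter (fun cat =>
    evidence_types.any (fun ev => PySem.Str.startswith ev cat))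

-- ===== PRECONDITION & SPEC =====
def Spec_infer_sources (evidence_types : List String) (out : List String) : Prop := out = infer_sources_alt evidence_types
instance (evidence_types : List String) (out : List String) : Decidable (Spec_infer_sources evidence_types out) := by unfold Spec_infer_sources; infer_instance

-- ===== CLAIM (what is proved, stated in full; the proofs are below) =====
def Claim_equal_infer_sources : Prop := ∀ (evidence_types : List String), Dom_infer_sources evidence_types → Spec_infer_sources evidence_types (infer_sources evidence_types)

-- ===== LEMMAS AND PROOFS =====

theorem pv_sw_disj {L p q : List Char} {a b : Char}
    (hp1 : p.head? = some a) (hq1 : q.head? = some b) (hab : a ≠ b)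
    (hp : PySem.Chars.startswith L p = true)
    (hq : PySem.Chars.startswith L q = true) : False := by
  obtain ⟨t1, h1⟩ := (PySem.Chars.startswith_iff _ _).1 hp
  obtain ⟨t2, h2⟩ := (PySem.Chars.startswith_iff _ _).1 hq
  cases p with
  | nil => simp at hp1
  | cons x xs =>
    cases q with
    | nil => simp at hq1
    | cons y ys =>
      simp at hp1 hq1
      rw [← h1] at h2
      simp at h2
      exact hab (hp1 ▸ hq1 ▸ h2.1.symm)

def pvStep (s : PySem.Set String) (ev : String) : PySem.Set String :=
  if PySem.Str.startswith ev "git" then PySem.Set.add s "git"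
  else if PySem.Str.startswith ev "doc" then PySem.Set.add s "doc"
  else if PySem.Str.startswith ev "code" then PySem.Set.add s "code"
  else s

theorem pv_nodup_fold (l : List String) (s : PySem.Set String) (hs : s.Nodup) :
    (l.foldl pvStep s).Nodup := by
  induction l generalizing s with
  | nil => exact hs
  | cons e t ih =>
    simp only [List.foldl_cons]
    apply ih
    unfold pvStep
    split_ifs <;> first | exact PySem.Set.nodup_add s _ hs | exact hs

theorem pv_mem_fold (l : List String) (s : PySem.Set String) (x : String) :
    x ∈ l.foldl pvStep s ↔ x ∈ s
      ∨ (x = "git" ∧ l.any (fun e => PySem.Str.startswith e "git"))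
      ∨ (x = "doc" ∧ l.any (fun e => PySem.Str.startswith e "doc"))
      ∨ (x = "code" ∧ l.any (fun e => PySem.Str.startswith e "code")) := by
  induction l generalizing s with
  | nil => simp
  | cons e t ih =>
    rw [List.foldl_cons, ih]
    by_cases hg : PySem.Chars.startswith e.toList "git".toList = true
    · have hd : PySem.Chars.startswith e.toList "doc".toList = false := by
        by_contra h; simp at h
        exact pv_sw_disj (a := 'g') (b := 'd') (by decide) (by decide) (by decide) hg h
      have hc : PySem.Chars.startswith e.toList "code".toList = false := by
        by_contra h; simp at h
        exact pv_sw_disj (a := 'g') (b := 'c') (by decide) (by decide) (by decide) hg h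
      simp only [pvStep, PySem.Str.startswith_eq, hg, hd, hc, if_true, if_false,
        Bool.false_eq_true, PySem.Set.mem_add, List.any_cons, Bool.or_eq_true, false_or]
      tauto
    · rw [Bool.not_eq_true] at hg
      by_cases hd : PySem.Chars.startswith e.toList "doc".toList = true
      · have hc : PySem.Chars.startswith e.toList "code".toList = false := by
          by_contra h; simp at h
          exact pv_sw_disj (a := 'd') (b := 'c') (by decide) (by decide) (by decide) hd h
        simp only [pvStep, PySem.Str.startswith_eq, hg, hd, hc, if_true, if_false,
          Bool.false_eq_true, PySem.Set.mem_add, List.any_cons, Bool.or_eq_true, false_or]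
        tauto
      · rw [Bool.not_eq_true] at hd
        by_cases hc : PySem.Chars.startswith e.toList "code".toList = true
        · simp only [pvStep, PySem.Str.startswith_eq, hg, hd, hc, if_true, if_false,
            Bool.false_eq_true, PySem.Set.mem_add, List.any_cons, Bool.or_eq_true, false_or]
          tauto
        · rw [Bool.not_eq_true] at hc
          simp only [pvStep, PySem.Str.startswith_eq, hg, hd, hc, if_true, if_false,
            Bool.false_eq_true, List.any_cons, Bool.or_eq_true, false_or]

theorem infer_sources_spec : Claim_equal_infer_sources := by
  intro l _
  unfold Spec_infer_sources infer_sources infer_sources_alt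
  show PySem.List.sorted (l.foldl pvStep PySem.Set.empty) (fun x => x) false = _
  apply PySem.List.sorted_eq_of_perm_of_pairwise_lt
  · apply (List.perm_ext_iff_of_nodup ?_ ?_).2
    · intro x
      rw [List.mem_filter, pv_mem_fold]
      constructor
      · rintro ⟨hx, hany⟩
        simp only [List.mem_cons, List.not_mem_nil, or_false] at hx
        rcases hx with h | h | h <;> subst h <;> simp_all
      · rintro (h | ⟨h, hany⟩ | ⟨h, hany⟩ | ⟨h, hany⟩)
        · simp [PySem.Set.empty] at h
        all_goals subst h; simp; simpa using hany
    · exact (by decide : (["code", "doc", "git"] : List String).Nodup).filter _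
    · exact pv_nodup_fold l _ (by simp [PySem.Set.empty])
  · have : (["code", "doc", "git"] : List String).Pairwise (· < ·) := by
      simp [String.lt_iff_toList_lt]
      refine ⟨⟨?_, ?_⟩, ?_⟩ <;> decide
    exact this.filter _
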